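-- pv_equiv track=rewrite | github.com/polaris-slo-cloud/via-lactea | stitch/model_spliting.py | detect_backbone_kind
-- ===== SOURCE A (Python) =====
-- def detect_backbone_kind(sd, base):
--     """Return 'resnet' or 'swin' or 'unknown' for a given anchors.<i>. base."""
--     # Heuristics
--     has_res = any(sd_k.startswith(base + p) for sd_k in sd.keys()
--                   for p in ("layer1.", "layer2.", "layer3.", "layer4.", "conv1.", "bn1."))
--     has_patch = any(k.startswith(base + "patch_embed.") for k in sd.keys())
--     has_layers = any(k.startswith(base + p) for k in sd.keys() for p in ("layers.", "stages.", "stage1.", "stage2.", "stage3.", "stage4."))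
--     if has_patch or has_layers:
--         return "swin"
--     if has_res:
--         return "resnet"
--     return "unknown"
-- ===== SOURCE B (Python) =====
-- _SWIN_PREFIXES = ("patch_embed.", "layers.", "stages.", "stage1.", "stage2.", "stage3.", "stage4.")
-- _RES_PREFIXES = ("layer1.", "layer2.", "layer3.", "layer4.", "conv1.", "bn1.")
--
--
-- def detect_backbone_kind(sd, base):
--     """Return 'resnet' or 'swin' or 'unknown' for a given anchors.<i>. base."""
--     # Single pass over the keys: strip the base once, then test the stripped
--     # remainder against the prefix tables; any swin signal wins immediately.
--     has_res = False
--     for k in sd.keys():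
--         if not k.startswith(base):
--             continue
--         rest = k[len(base):]
--         if rest.startswith(_SWIN_PREFIXES):
--             return "swin"
--         if rest.startswith(_RES_PREFIXES):
--             has_res = True
--     return "resnet" if has_res else "unknown"
-- ===== Notes on version B (the rewrite author's own statement) =====
-- stated objective: faster
-- what changed: Replaces A's three separate any() scans over all keys (each re-concatenating base with every prefix) with one pass that strips the base from each key once, tests the remainder against tuple prefix tables, and returns 'swin' immediately on the first swin signal.
import Mathlib
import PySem

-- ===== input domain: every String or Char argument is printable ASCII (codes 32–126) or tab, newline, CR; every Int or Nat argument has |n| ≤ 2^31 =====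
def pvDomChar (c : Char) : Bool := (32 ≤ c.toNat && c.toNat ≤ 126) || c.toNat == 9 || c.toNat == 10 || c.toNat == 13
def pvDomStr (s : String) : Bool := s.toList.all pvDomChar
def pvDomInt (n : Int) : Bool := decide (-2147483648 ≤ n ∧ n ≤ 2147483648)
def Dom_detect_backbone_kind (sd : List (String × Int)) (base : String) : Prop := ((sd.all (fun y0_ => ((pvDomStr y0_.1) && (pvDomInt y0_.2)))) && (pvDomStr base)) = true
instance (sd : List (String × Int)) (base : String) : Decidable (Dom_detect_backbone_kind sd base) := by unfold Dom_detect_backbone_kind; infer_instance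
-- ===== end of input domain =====

-- B makes one pass over the keys, stripping the base once per key, instead of A's three
-- full any() scans; same return value, objective: simpler.

-- ===== PORT A =====
-- the tuples of prefixes from A's generator expressions
def pvResPrefixes : List String := ["layer1.", "layer2.", "layer3.", "layer4.", "conv1.", "bn1."]
def pvLayerPrefixes : List String := ["layers.", "stages.", "stage1.", "stage2.", "stage3.", "stage4."]

-- sd_k.startswith(base + p); string concatenation done on the List Char side (exact:
-- (base + p).toList = base.toList ++ p.toList), startswith via PySem.Chars.startswith
def detect_backbone_kind (sd : List (String × Int)) (base : String) : String :=
  let has_res := sd.any (fun kv => pvResPrefixes.any (fun p =>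
    PySem.Chars.startswith kv.1.toList (base.toList ++ p.toList)))
  let has_patch := sd.any (fun kv =>
    PySem.Chars.startswith kv.1.toList (base.toList ++ "patch_embed.".toList))
  let has_layers := sd.any (fun kv => pvLayerPrefixes.any (fun p =>
    PySem.Chars.startswith kv.1.toList (base.toList ++ p.toList)))
  if has_patch || has_layers then "swin"
  else if has_res then "resnet"
  else "unknown"

-- ===== PORT B =====
-- B's swin prefix table ("patch_embed." first, then the layer prefixes)
def pvSwinPrefixes : List String := ["patch_embed.", "layers.", "stages.", "stage1.", "stage2.", "stage3.", "stage4."]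

-- B's loop: for k in sd.keys(): …, with the has_res accumulator; k[len(base):] with
-- len(base) ≥ 0 is exactly List.drop base.length on the char list
def pvAltLoop (base : List Char) : List (String × Int) → Bool → String
  | [], has_res => if has_res then "resnet" else "unknown"
  | kv :: rest, has_res =>
    let k := kv.1.toList
    if PySem.Chars.startswith k base then
      let r := k.drop base.length
      if pvSwinPrefixes.any (fun p => PySem.Chars.startswith r p.toList) then "swin"
      else pvAltLoop base rest
        (if pvResPrefixes.any (fun p => PySem.Chars.startswith r p.toList) then true else has_res)
    else pvAltLoop base rest has_res

def detect_backbone_kind_alt (sd : List (String × Int)) (base : String) : String :=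
  pvAltLoop base.toList sd false

-- ===== PRECONDITION & SPEC =====
def Spec_detect_backbone_kind (sd : List (String × Int)) (base : String) (out : String) : Prop := out = detect_backbone_kind_alt sd base
instance (sd : List (String × Int)) (base : String) (out : String) : Decidable (Spec_detect_backbone_kind sd base out) := by unfold Spec_detect_backbone_kind; infer_instance

-- ===== CLAIM (what is proved, stated in full; the proofs are below) =====
def Claim_equal_detect_backbone_kind : Prop := ∀ (sd : List (String × Int)) (base : String), Dom_detect_backbone_kind sd base → Spec_detect_backbone_kind sd base (detect_backbone_kind sd base)

-- ===== LEMMAS AND PROOFS =====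

-- startswith against a concatenated prefix splits into base match + remainder match
theorem pv_startswith_append (b p k : List Char) :
    PySem.Chars.startswith k (b ++ p)
      = (PySem.Chars.startswith k b && PySem.Chars.startswith (k.drop b.length) p) := by
  by_cases hb : b <+: k
  · obtain ⟨t, rfl⟩ := hb
    have h1 : PySem.Chars.startswith (b ++ t) b = true :=
      (PySem.Chars.startswith_iff _ _).2 ⟨t, rfl⟩
    have h2 : PySem.Chars.startswith (b ++ t) (b ++ p) = PySem.Chars.startswith t p := by
      by_cases hp : p <+: t
      · obtain ⟨u, rfl⟩ := hp
        have := (PySem.Chars.startswith_iff (b ++ (p ++ u)) (b ++ p)).2 ⟨u, by simp⟩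
        simp [this, (PySem.Chars.startswith_iff (p ++ u) p).2 ⟨u, rfl⟩]
      · have hL : ¬ (b ++ p <+: b ++ t) := fun h => hp ((List.prefix_append_right_inj b).1 h)
        have e1 : PySem.Chars.startswith (b ++ t) (b ++ p) = false := by
          rw [Bool.eq_false_iff]; intro h; exact hL ((PySem.Chars.startswith_iff _ _).1 h)
        have e2 : PySem.Chars.startswith t p = false := by
          rw [Bool.eq_false_iff]; intro h; exact hp ((PySem.Chars.startswith_iff _ _).1 h)
        rw [e1, e2]
    simp [h1, h2]
  · have h1 : PySem.Chars.startswith k b = false := by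
      rw [Bool.eq_false_iff]; intro h; exact hb ((PySem.Chars.startswith_iff _ _).1 h)
    have h2 : PySem.Chars.startswith k (b ++ p) = false := by
      rw [Bool.eq_false_iff]; intro h
      exact hb ((List.prefix_append b p).trans ((PySem.Chars.startswith_iff _ _).1 h))
    simp [h1, h2]

-- not starting with the base kills every combined-prefix test
theorem pv_no_base (b k : List Char) (h : PySem.Chars.startswith k b = false) (p : List Char) :
    PySem.Chars.startswith k (b ++ p) = false := by
  rw [pv_startswith_append, h, Bool.false_and]

-- pure Boolean shape of one loop step
theorem pv_step (P L R Ap Al Ar hr : Bool) :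
    (if (P || L) = true then "swin"
     else if (Ap || Al) = true then "swin"
     else if ((if R = true then true else hr) || Ar) = true then "resnet" else "unknown")
  = (if ((P || Ap) || (L || Al)) = true then "swin"
     else if (hr || (R || Ar)) = true then "resnet" else "unknown") := by
  cases P <;> cases L <;> cases R <;> cases Ap <;> cases Al <;> cases Ar <;> cases hr <;> rfl

-- the loop invariant: pvAltLoop computes A's decision with has_res folded in
theorem pv_loop_eq (b : List Char) : ∀ (sd : List (String × Int)) (hr : Bool),
    pvAltLoop b sd hr
      = (if (sd.any (fun kv => PySem.Chars.startswith kv.1.toList (b ++ "patch_embed.".toList))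
            || sd.any (fun kv => pvLayerPrefixes.any (fun p =>
                 PySem.Chars.startswith kv.1.toList (b ++ p.toList)))) then "swin"
         else if (hr || sd.any (fun kv => pvResPrefixes.any (fun p =>
                 PySem.Chars.startswith kv.1.toList (b ++ p.toList)))) then "resnet"
         else "unknown")
  | [], hr => by simp [pvAltLoop]
  | kv :: rest, hr => by
    rw [pvAltLoop]
    by_cases hb : PySem.Chars.startswith kv.1.toList b = true
    · simp only [hb, if_true, pvSwinPrefixes, pvLayerPrefixes, pvResPrefixes,
        List.any_cons, List.any_nil, pv_startswith_append, Bool.true_and,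
        pv_loop_eq b rest, Bool.or_false]
      exact pv_step _ _ _ _ _ _ _
    · rw [Bool.not_eq_true] at hb
      simp only [hb, Bool.false_eq_true, if_false, List.any_cons, List.any_nil,
        pvLayerPrefixes, pvResPrefixes, pv_no_base b _ hb,
        Bool.false_or, Bool.or_false, pv_loop_eq b rest]

-- ===== VERDICT (by name: the statement is the Claim_ definition above) =====
theorem detect_backbone_kind_spec : Claim_equal_detect_backbone_kind := by
  intro sd base _
  unfold Spec_detect_backbone_kind detect_backbone_kind detect_backbone_kind_alt
  rw [pv_loop_eq base.toList sd false]
  simp only [Bool.false_or]
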